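-- pv_equiv track=rewrite | github.com/JiajiaLi-1130/PIA | src/PLE/attack_qlora/attack_qlora.py | _parse_safety_assessment
-- ===== SOURCE A (Python) =====
-- from typing import Any
--
-- def _parse_safety_assessment(assessment: str) -> dict[str, Any]:
--     """Parse WildGuard output"""
--     lines = assessment.strip().split('\n')
--     harmful_request = None
--     response_refusal = None
--     harmful_response = None
--
--     for line in lines:
--         line = line.strip().lower()
--         if line.startswith('harmful request:'):
--             harmful_request = 'yes' in line
--         elif line.startswith('response refusal:'):
--             response_refusal = 'yes' in line
--         elif line.startswith('harmful response:'):
--             harmful_response = 'yes' in line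
--
--     is_safe = None
--     if harmful_response is not None:
--         is_safe = not harmful_response
--
--     return {
--         "is_safe": is_safe,
--         "harmful_request": harmful_request,
--         "response_refusal": response_refusal,
--         "harmful_response": harmful_response
--     }
-- ===== SOURCE B (Python) =====
-- def _parse_safety_assessment(assessment: str) -> dict:
--     """Parse WildGuard output (per-field scan, last match wins)."""
--     norm = [line.strip().lower() for line in assessment.strip().split('\n')]
--
--     def flag(prefix):
--         matches = [l for l in norm if l.startswith(prefix)]
--         return ('yes' in matches[-1]) if matches else None
--
--     harmful_request = flag('harmful request:')
--     response_refusal = flag('response refusal:')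
--     harmful_response = flag('harmful response:')
--     is_safe = None if harmful_response is None else (not harmful_response)
--     return {
--         "is_safe": is_safe,
--         "harmful_request": harmful_request,
--         "response_refusal": response_refusal,
--         "harmful_response": harmful_response,
--     }
-- ===== Notes on version B (the rewrite author's own statement) =====
-- stated objective: idiomatic
-- what changed: Replaces the stateful single line-loop with an elif chain by three independent per-field scans (filter the normalized lines by prefix, take the last match), assembling the dict from the three results.
import Mathlib
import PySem

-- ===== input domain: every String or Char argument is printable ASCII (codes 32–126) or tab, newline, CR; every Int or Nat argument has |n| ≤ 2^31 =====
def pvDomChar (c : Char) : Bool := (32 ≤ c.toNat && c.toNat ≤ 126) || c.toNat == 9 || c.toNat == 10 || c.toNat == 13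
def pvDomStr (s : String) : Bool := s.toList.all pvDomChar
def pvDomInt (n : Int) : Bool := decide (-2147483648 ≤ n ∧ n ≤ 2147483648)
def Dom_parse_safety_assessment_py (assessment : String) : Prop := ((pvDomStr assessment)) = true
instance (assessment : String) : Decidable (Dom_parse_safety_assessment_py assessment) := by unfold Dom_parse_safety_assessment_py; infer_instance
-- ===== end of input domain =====

-- B replaces A's stateful single line-loop (elif chain) by three independent per-field
-- scans (filter normalized lines by prefix, last match wins); objective: idiomatic.

-- ===== PORT A =====
-- A's loop body after `line = line.strip().lower()`: the elif chain updating the state triple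
def pvStep (st : Option Bool × Option Bool × Option Bool) (l : List Char) :
    Option Bool × Option Bool × Option Bool :=
  if PySem.Chars.startswith l ("harmful request:".toList) then
    (some (PySem.Chars.isIn ("yes".toList) l), st.2.1, st.2.2)
  else if PySem.Chars.startswith l ("response refusal:".toList) then
    (st.1, some (PySem.Chars.isIn ("yes".toList) l), st.2.2)
  else if PySem.Chars.startswith l ("harmful response:".toList) then
    (st.1, st.2.1, some (PySem.Chars.isIn ("yes".toList) l))
  else st

def parse_safety_assessment_py (assessment : String) : List (String × Option Bool) :=
  let lines := PySem.Chars.splitOn (PySem.Chars.strip assessment.toList) ['\n']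
  let st := lines.foldl
    (fun st line => pvStep st (PySem.Chars.lower (PySem.Chars.strip line)))
    (none, none, none)
  let is_safe : Option Bool := match st.2.2 with
    | some b => some (!b)
    | none => none
  [("is_safe", is_safe), ("harmful_request", st.1),
   ("response_refusal", st.2.1), ("harmful_response", st.2.2)]

-- ===== PORT B =====
-- last normalized line starting with `pre`, as a yes-flag; none if no line matches
def pvFlag (norm : List (List Char)) (pre : List Char) : Option Bool :=
  ((norm.filter (fun l => PySem.Chars.startswith l pre)).getLast?).map
    (fun m => PySem.Chars.isIn ("yes".toList) m)

def parse_safety_assessment_py_alt (assessment : String) : List (String × Option Bool) :=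
  let norm := (PySem.Chars.splitOn (PySem.Chars.strip assessment.toList) ['\n']).map
    (fun l => PySem.Chars.lower (PySem.Chars.strip l))
  let harmful_request := pvFlag norm ("harmful request:".toList)
  let response_refusal := pvFlag norm ("response refusal:".toList)
  let harmful_response := pvFlag norm ("harmful response:".toList)
  let is_safe := harmful_response.map (fun b => !b)
  [("is_safe", is_safe), ("harmful_request", harmful_request),
   ("response_refusal", response_refusal), ("harmful_response", harmful_response)]

-- ===== PRECONDITION & SPEC =====
def Spec_parse_safety_assessment_py (assessment : String) (out : List (String × Option Bool)) : Prop := out = parse_safety_assessment_py_alt assessment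
instance (assessment : String) (out : List (String × Option Bool)) : Decidable (Spec_parse_safety_assessment_py assessment out) := by unfold Spec_parse_safety_assessment_py; infer_instance

-- ===== CLAIM (what is proved, stated in full; the proofs are below) =====
def Claim_equal_parse_safety_assessment_py : Prop := ∀ (assessment : String), Dom_parse_safety_assessment_py assessment → Spec_parse_safety_assessment_py assessment (parse_safety_assessment_py assessment)

-- ===== LEMMAS AND PROOFS =====

-- the three prefixes are mutually exclusive: no line starts with two of them
lemma pv_excl (p q l : List Char) (hne : ¬ p <+: q ∧ ¬ q <+: p)
    (h : PySem.Chars.startswith l q = true) : PySem.Chars.startswith l p = false := by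
  rw [PySem.Chars.startswith_iff] at h
  by_contra hc
  rw [Bool.not_eq_false, PySem.Chars.startswith_iff] at hc
  rcases List.prefix_or_prefix_of_prefix hc h with h' | h'
  · exact hne.1 h'
  · exact hne.2 h'

lemma pvFlag_append (L : List (List Char)) (x p : List Char) :
    pvFlag (L ++ [x]) p =
      if PySem.Chars.startswith x p then some (PySem.Chars.isIn ("yes".toList) x)
      else pvFlag L p := by
  unfold pvFlag
  rw [List.filter_append]
  by_cases h : PySem.Chars.startswith x p = true
  · simp [h]
  · simp [h]

-- the fold computes the three last-match flags, component by component
lemma pv_fold_eq_flags (L : List (List Char)) :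
    L.foldl pvStep (none, none, none) =
      (pvFlag L ("harmful request:".toList),
       pvFlag L ("response refusal:".toList),
       pvFlag L ("harmful response:".toList)) := by
  induction L using List.reverseRecOn with
  | nil => rfl
  | append_singleton L x ih =>
      rw [List.foldl_append, List.foldl_cons, List.foldl_nil, ih,
        pvFlag_append, pvFlag_append, pvFlag_append]
      unfold pvStep
      by_cases h1 : PySem.Chars.startswith x ("harmful request:".toList) = true
      · have h2 := pv_excl ("response refusal:".toList) ("harmful request:".toList) x (by decide) h1
        have h3 := pv_excl ("harmful response:".toList) ("harmful request:".toList) x (by decide) h1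
        simp only [h1, h2, h3]
        simp
      · by_cases h2 : PySem.Chars.startswith x ("response refusal:".toList) = true
        · have h3 := pv_excl ("harmful response:".toList) ("response refusal:".toList) x (by decide) h2
          simp only [Bool.not_eq_true] at h1
          simp only [h1, h2, h3]
          simp
        · by_cases h3 : PySem.Chars.startswith x ("harmful response:".toList) = true
          · simp only [Bool.not_eq_true] at h1 h2
            simp only [h1, h2, h3]
            simp
          · simp only [Bool.not_eq_true] at h1 h2 h3
            simp only [h1, h2, h3]
            simp

-- ===== VERDICT (by name: the statement is the Claim_ definition above) =====
theorem parse_safety_assessment_py_spec : Claim_equal_parse_safety_assessment_py := by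
  intro assessment _
  unfold Spec_parse_safety_assessment_py parse_safety_assessment_py parse_safety_assessment_py_alt
  dsimp only
  rw [← List.foldl_map, pv_fold_eq_flags]
  rcases pvFlag _ ("harmful response:".toList) with _ | b <;> rfl
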